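-- pv_equiv track=rewrite | github.com/Starry331/Daydream-cli | src/daydream/server.py | _fixture_response_text
-- ===== SOURCE A (Python) =====
-- def _fixture_response_text(messages: list[dict]) -> str:
--     for message in reversed(messages):
--         if message.get("role") != "user":
--             continue
--         content = str(message.get("content", "")).lower()
--         if "hello" in content:
--             return "Hello from Daydream."
--         return "Daydream is running in offline fixture mode."
--     return "Hello from Daydream."
-- ===== SOURCE B (Python) =====
-- def _fixture_response_text(messages: list[dict]) -> str:
--     replies = [
--         ("Hello from Daydream."
--          if "hello" in str(m.get("content", "")).lower()
--          else "Daydream is running in offline fixture mode.")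
--         for m in messages
--         if m.get("role") == "user"
--     ]
--     return replies[-1] if replies else "Hello from Daydream."
-- ===== Notes on version B (the rewrite author's own statement) =====
-- stated objective: alternative
-- what changed: Instead of scanning backwards for one message and deciding inline, B eagerly maps every user message to its fixture reply in one comprehension and then just takes the last reply (or the default if there are none): a map-then-select plan rather than a search-then-decide scan.
import Mathlib
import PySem

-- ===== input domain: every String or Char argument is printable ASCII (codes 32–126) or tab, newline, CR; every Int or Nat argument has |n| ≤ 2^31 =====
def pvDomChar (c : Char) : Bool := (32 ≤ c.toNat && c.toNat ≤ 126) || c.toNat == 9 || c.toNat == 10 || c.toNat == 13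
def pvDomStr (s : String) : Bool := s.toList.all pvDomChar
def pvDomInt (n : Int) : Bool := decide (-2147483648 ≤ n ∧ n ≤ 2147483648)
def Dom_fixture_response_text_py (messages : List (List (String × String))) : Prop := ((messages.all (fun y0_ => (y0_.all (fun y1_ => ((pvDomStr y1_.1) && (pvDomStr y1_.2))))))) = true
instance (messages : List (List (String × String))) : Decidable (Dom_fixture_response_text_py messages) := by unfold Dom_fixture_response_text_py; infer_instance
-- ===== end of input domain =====

-- B replaces A's backward search-then-decide scan by eagerly mapping every user message to its fixture reply and selecting the last reply (alternative plan, same result).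


-- ===== PORT A =====
-- loop 'for message in reversed(messages)' with early returns, as structural recursion on the reversed list
def pvAScan : List (List (String × String)) → String
  | [] => "Hello from Daydream."
  | message :: rest =>
    if PySem.Dict.get? ⟨message⟩ "role" ≠ some "user" then pvAScan rest
    else
      let content := PySem.Str.lower (PySem.Dict.getD ⟨message⟩ "content" "")
      if PySem.Str.isIn "hello" content then "Hello from Daydream."
      else "Daydream is running in offline fixture mode."

def fixture_response_text_py (messages : List (List (String × String))) : String :=
  pvAScan messages.reverse

-- ===== PORT B =====
-- the comprehension's per-element reply
def pvReply (message : List (String × String)) : String :=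
  if PySem.Str.isIn "hello" (PySem.Str.lower (PySem.Dict.getD ⟨message⟩ "content" "")) then
    "Hello from Daydream."
  else "Daydream is running in offline fixture mode."

def fixture_response_text_py_alt (messages : List (List (String × String))) : String :=
  let replies :=
    (messages.filter (fun m => PySem.Dict.get? ⟨m⟩ "role" == some "user")).map pvReply
  match replies.getLast? with          -- replies[-1] if replies else default
  | some r => r
  | none => "Hello from Daydream."

-- ===== PRECONDITION & SPEC =====
def Spec_fixture_response_text_py (messages : List (List (String × String))) (out : String) : Prop := out = fixture_response_text_py_alt messages
instance (messages : List (List (String × String))) (out : String) : Decidable (Spec_fixture_response_text_py messages out) := by unfold Spec_fixture_response_text_py; infer_instance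

-- ===== CLAIM (what is proved, stated in full; the proofs are below) =====
def Claim_equal_fixture_response_text_py : Prop := ∀ (messages : List (List (String × String))), Dom_fixture_response_text_py messages → Spec_fixture_response_text_py messages (fixture_response_text_py messages)

-- ===== LEMMAS AND PROOFS =====

theorem pvScan_eq (r : List (List (String × String))) :
    pvAScan r =
      (((r.reverse.filter (fun m => PySem.Dict.get? ⟨m⟩ "role" == some "user")).map pvReply).getLast?).getD
        "Hello from Daydream." := by
  induction r with
  | nil => rfl
  | cons m rest ih =>
    rw [List.reverse_cons, List.filter_append, List.map_append]
    by_cases h : PySem.Dict.get? ⟨m⟩ "role" = some "user"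
    · simp [pvAScan, h, pvReply]
    · simp [pvAScan, h, ih]

-- ===== VERDICT (by name: the statement is the Claim_ definition above) =====
theorem fixture_response_text_py_spec : Claim_equal_fixture_response_text_py := by
  intro messages _
  show fixture_response_text_py messages = fixture_response_text_py_alt messages
  rw [fixture_response_text_py, pvScan_eq, List.reverse_reverse, fixture_response_text_py_alt]
  cases h : ((messages.filter (fun m => PySem.Dict.get? ⟨m⟩ "role" == some "user")).map pvReply).getLast? <;>
    simp [h]
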